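-- pv_equiv track=rewrite | github.com/WMaia9/Sign2German | extract_keypoints.py | last_valid_coord
-- ===== SOURCE A (Python) =====
-- def last_valid_coord(data, frame):
--     last_coord = 0
--     for n_frame, frame_data in enumerate(data):
--         if n_frame > frame:
--             break
--         sum_frame = 0
--         for n, coord in enumerate(frame_data):
--             sum_frame += sum(coord)
--         if sum_frame != 0:
--             last_coord = n_frame
--     return last_coord
-- ===== SOURCE B (Python) =====
-- def last_valid_coord(data, frame):
--     idx = min(frame, len(data) - 1)
--     if idx < 0:
--         return 0
--     for i in range(idx, -1, -1):
--         total = sum(sum(coord) for coord in data[i])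
--         if total != 0:
--             return i
--     return 0
-- ===== Notes on version B (the rewrite author's own statement) =====
-- stated objective: alternative
-- what changed: Backward scan from min(frame, len-1) returning the first frame with nonzero total coordinate sum (early exit), instead of A's forward pass tracking the last nonzero frame.
import Mathlib
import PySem

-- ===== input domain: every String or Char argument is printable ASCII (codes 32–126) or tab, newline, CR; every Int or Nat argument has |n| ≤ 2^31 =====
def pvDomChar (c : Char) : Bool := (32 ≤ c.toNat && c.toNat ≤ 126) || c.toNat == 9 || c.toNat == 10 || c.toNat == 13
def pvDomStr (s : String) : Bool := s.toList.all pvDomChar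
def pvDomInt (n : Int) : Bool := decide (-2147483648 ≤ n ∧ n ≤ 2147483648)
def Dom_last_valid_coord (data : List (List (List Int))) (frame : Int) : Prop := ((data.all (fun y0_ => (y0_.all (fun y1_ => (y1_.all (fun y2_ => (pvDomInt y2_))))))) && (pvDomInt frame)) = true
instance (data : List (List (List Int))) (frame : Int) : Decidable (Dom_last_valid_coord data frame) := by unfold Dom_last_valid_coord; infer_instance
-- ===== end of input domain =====

-- B replaces A's forward pass (tracking the last frame index with nonzero total) by a
-- backward scan from min(frame, len(data)-1) that returns the first nonzero frame found
-- (early exit); objective: alternative algorithm, same worst-case cost.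

-- ===== PORT A =====
-- the for-loop with `break` over enumerate(data): n_frame counts up, last_coord is the accumulator
def aLoop : List (List (List Int)) → Nat → Int → Int → Int
  | [], _, _, last_coord => last_coord
  | frame_data :: rest, n_frame, frame, last_coord =>
    if (n_frame : Int) > frame then last_coord
    else
      let sum_frame := frame_data.foldl (fun acc coord => acc + coord.sum) 0
      aLoop rest (n_frame + 1) frame (if sum_frame ≠ 0 then (n_frame : Int) else last_coord)

def last_valid_coord (data : List (List (List Int))) (frame : Int) : Int :=
  aLoop data 0 frame 0

-- ===== PORT B =====
-- total = sum(sum(coord) for coord in data[i])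
def frameTotal (fd : List (List Int)) : Int := (fd.map List.sum).sum

-- the `for i in range(idx, -1, -1)` loop; data[i] is always in range (0 ≤ i ≤ len-1), so getD is exact
def bLoop (data : List (List (List Int))) : Nat → Int
  | 0 => if frameTotal (data.getD 0 []) ≠ 0 then 0 else 0
  | i + 1 => if frameTotal (data.getD (i + 1) []) ≠ 0 then ((i : Int) + 1) else bLoop data i

def last_valid_coord_alt (data : List (List (List Int))) (frame : Int) : Int :=
  let idx : Int := min frame ((data.length : Int) - 1)
  if idx < 0 then 0 else bLoop data idx.toNat

-- ===== PRECONDITION & SPEC =====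
def Spec_last_valid_coord (data : List (List (List Int))) (frame : Int) (out : Int) : Prop := out = last_valid_coord_alt data frame
instance (data : List (List (List Int))) (frame : Int) (out : Int) : Decidable (Spec_last_valid_coord data frame out) := by unfold Spec_last_valid_coord; infer_instance

-- ===== CLAIM (what is proved, stated in full; the proofs are below) =====
def Claim_equal_last_valid_coord : Prop := ∀ (data : List (List (List Int))) (frame : Int), Dom_last_valid_coord data frame → Spec_last_valid_coord data frame (last_valid_coord data frame)

-- ===== LEMMAS AND PROOFS =====

-- backward scan generalized with a lower stop index n and a fallback value
def gScan (data : List (List (List Int))) (n : Nat) (fallback : Int) : Nat → Int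
  | 0 => if 0 < n then fallback else if frameTotal (data.getD 0 []) ≠ 0 then 0 else fallback
  | i + 1 =>
    if i + 1 < n then fallback
    else if frameTotal (data.getD (i + 1) []) ≠ 0 then ((i : Int) + 1) else gScan data n fallback i

lemma gScan_zero (data : List (List (List Int))) (i : Nat) :
    gScan data 0 0 i = bLoop data i := by
  induction i with
  | zero => simp [gScan, bLoop]
  | succ i ih => simp [gScan, bLoop, ih]

lemma frame_sum_eq (fd : List (List Int)) :
    fd.foldl (fun acc coord => acc + coord.sum) 0 = frameTotal fd := by
  unfold frameTotal
  rw [List.sum_eq_foldl, ← List.foldl_map]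

lemma gScan_below (data : List (List (List Int))) (n : Nat) (fb : Int) :
    ∀ i, i < n → gScan data n fb i = fb := by
  intro i
  induction i with
  | zero => intro h; simp [gScan, h]
  | succ i ih => intro h; simp [gScan, h]

lemma gScan_at_n (data : List (List (List Int))) (n : Nat) (fb : Int) :
    gScan data n fb n = if frameTotal (data.getD n []) ≠ 0 then (n : Int) else fb := by
  cases n with
  | zero => simp [gScan]
  | succ m =>
    have h1 : ¬ (m + 1 < m + 1) := by omega
    have h2 := gScan_below data (m + 1) fb m (by omega)
    simp [gScan, h2]

lemma gScan_lower (data : List (List (List Int))) (n : Nat) (fb : Int)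
    (fb' : Int) (hfb : fb' = if frameTotal (data.getD n []) ≠ 0 then (n : Int) else fb)
    (i : Nat) (hi : n ≤ i) :
    gScan data (n + 1) fb' i = gScan data n fb i := by
  induction i with
  | zero =>
    have hn : n = 0 := by omega
    subst hn
    simp only [Nat.cast_zero] at hfb
    by_cases h : frameTotal (data.getD 0 []) = 0 <;> simp [gScan, hfb]
  | succ i ih =>
    by_cases he : n = i + 1
    · subst he
      have h1 : i + 1 < i + 1 + 1 := by omega
      rw [show gScan data (i + 1 + 1) fb' (i + 1) = fb' from by
        cases h : i + 1 with
        | zero => omega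
        | succ k => simp [gScan, h1, ← h]]
      rw [gScan_at_n, ← hfb]
    · have hni : n ≤ i := by omega
      have h1 : ¬ (i + 1 < n + 1) := by omega
      have h2 : ¬ (i + 1 < n) := by omega
      simp only [gScan, h1, h2, if_neg, not_false_iff]
      by_cases h : frameTotal (data.getD (i + 1) []) = 0 <;> simp [ih hni]

lemma aLoop_eq_gScan (rest : List (List (List Int))) :
    ∀ (data : List (List (List Int))) (n : Nat) (frame last : Int),
    data.drop n = rest →
    aLoop rest n frame last =
      if min frame ((data.length : Int) - 1) < (n : Int) then last
      else gScan data n last (min frame ((data.length : Int) - 1)).toNat := by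
  induction rest with
  | nil =>
    intro data n frame last hd
    have hlen : data.length ≤ n := by
      by_contra h
      have := List.drop_eq_nil_iff.mp hd
      omega
    have hc : min frame ((data.length : Int) - 1) < (n : Int) := by
      have h1 : (data.length : Int) ≤ (n : Int) := by exact_mod_cast hlen
      have h2 := min_le_right frame ((data.length : Int) - 1)
      omega
    simp [aLoop, hc]
  | cons fd rest ih =>
    intro data n frame last hd
    have hn : n < data.length := by
      by_contra h
      rw [List.drop_eq_nil_iff.mpr (by omega)] at hd
      exact (List.cons_ne_nil _ _) hd.symm
    have hget : data.getD n [] = fd := by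
      have h1 : data.getD n [] = (data.drop n).getD 0 [] := by
        simp [List.getD, List.getElem?_drop]
      rw [h1, hd]; rfl
    have hd' : data.drop (n + 1) = rest := by
      have h := congrArg (List.drop 1) hd
      simpa [List.drop_drop] using h
    by_cases hbr : (n : Int) > frame
    · have hc1 : min frame ((data.length : Int) - 1) < (n : Int) := by
        have := min_le_left frame ((data.length : Int) - 1)
        omega
      simp [aLoop, hbr, hc1]
    · have hlen1 : (n : Int) ≤ (data.length : Int) - 1 := by
        have : (n : Int) < (data.length : Int) := by exact_mod_cast hn
        omega
      have hml : (n : Int) ≤ min frame ((data.length : Int) - 1) := le_min (by omega) hlen1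
      have hnot : ¬ (min frame ((data.length : Int) - 1) < (n : Int)) := by omega
      rw [if_neg hnot]
      simp only [aLoop]
      rw [if_neg hbr]
      simp only [frame_sum_eq]
      rw [ih data (n + 1) frame _ hd']
      by_cases hc : min frame ((data.length : Int) - 1) < (n : Int) + 1
      · have hmt : (min frame ((data.length : Int) - 1)).toNat = n := by omega
        rw [if_pos (by push_cast; omega), hmt, gScan_at_n, hget]
      · rw [if_neg (by push_cast; omega)]
        exact gScan_lower data n last _ (by rw [hget]) _ (by omega)

-- ===== VERDICT (by name: the statement is the Claim_ definition above) =====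
theorem last_valid_coord_spec : Claim_equal_last_valid_coord := by
  intro data frame _
  unfold Spec_last_valid_coord last_valid_coord last_valid_coord_alt
  rw [aLoop_eq_gScan data data 0 frame 0 (by simp)]
  simp only [Nat.cast_zero]
  by_cases h : min frame ((data.length : Int) - 1) < 0
  · simp [h]
  · simp [h, gScan_zero]
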